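-- pv_equiv track=rewrite | github.com/kuberca/star | datasource/batcher.py | get_line_contexts
-- ===== SOURCE A (Python) =====
-- def get_line_contexts(file, line_num):
--     line_num = int(line_num)
--     line_num_before = line_num - 100
--     line_num_after = line_num + 100
--     if line_num_before < 0:
--         line_num_before = 0
--
--     lines = []
--     current = 0
--     for line in file:
--         current += 1
--         if current < line_num_before:
--             continue
--         elif current > line_num_after:
--             break
--
--         if current == line_num:
--             lines.append("<==============================================================================>")
--             lines.append(line)
--             lines.append("<==============================================================================>")
--         else:
--             lines.append(line)
--
--     return lines
-- ===== SOURCE B (Python) =====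
-- SEP = "<==============================================================================>"
--
-- def get_line_contexts(file, line_num):
--     line_num = int(line_num)
--     start = max(0, line_num - 101)
--     stop = max(0, line_num + 100)
--     out = []
--     for i, line in enumerate(file[start:stop], start + 1):
--         if i == line_num:
--             out += [SEP, line, SEP]
--         else:
--             out.append(line)
--     return out
-- ===== Notes on version B (the rewrite author's own statement) =====
-- stated objective: simpler
-- what changed: Replaced A's single scan with a running counter, continue-skip and break by materializing the window with one clamped slice file[max(0,line_num-101):max(0,line_num+100)] and a plain enumerate pass that inserts the marker lines.
import Mathlib
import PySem

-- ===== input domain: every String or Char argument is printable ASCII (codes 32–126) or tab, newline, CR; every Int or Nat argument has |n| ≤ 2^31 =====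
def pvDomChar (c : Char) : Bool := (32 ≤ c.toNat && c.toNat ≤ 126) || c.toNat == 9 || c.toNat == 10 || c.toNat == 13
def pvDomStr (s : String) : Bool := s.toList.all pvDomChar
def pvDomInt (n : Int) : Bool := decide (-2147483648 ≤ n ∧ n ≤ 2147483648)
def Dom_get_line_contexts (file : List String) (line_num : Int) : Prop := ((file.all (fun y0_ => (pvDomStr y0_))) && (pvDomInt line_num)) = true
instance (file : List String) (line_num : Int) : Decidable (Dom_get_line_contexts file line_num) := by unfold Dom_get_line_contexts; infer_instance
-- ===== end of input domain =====

-- B replaces A's scan-with-skip/break loop by a clamped slice of the window plus a single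
-- enumerate pass that inserts the marker; same values everywhere (objective: simpler).


def gclSep : String := "<==============================================================================>"

-- ===== PORT A =====
-- A's for-loop with `continue` (skip while current < line_num_before) and `break`
-- (stop once current > line_num_after), appending marker lines around line_num.
def gclLoopA (before after ln : Int) : List String → Int → List String
  | [], _ => []
  | line :: rest, current =>
    let c := current + 1
    if c < before then gclLoopA before after ln rest c
    else if c > after then []
    else if c = ln then gclSep :: line :: gclSep :: gclLoopA before after ln rest c
    else line :: gclLoopA before after ln rest c

def get_line_contexts (file : List String) (line_num : Int) : List String :=
  let before0 := line_num - 100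
  let before := if before0 < 0 then 0 else before0
  let after := line_num + 100
  gclLoopA before after line_num file 0

-- ===== PORT B =====
-- B's enumerate(window, start+1) loop over the sliced window.
def gclLoopB (ln : Int) : List String → Int → List String
  | [], _ => []
  | line :: rest, i =>
    if i = ln then gclSep :: line :: gclSep :: gclLoopB ln rest (i + 1)
    else line :: gclLoopB ln rest (i + 1)

def get_line_contexts_alt (file : List String) (line_num : Int) : List String :=
  let start := max 0 (line_num - 101)
  let stop := max 0 (line_num + 100)
  gclLoopB line_num (PySem.List.slice file (some start) (some stop)) (start + 1)

-- ===== PRECONDITION & SPEC =====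
def Spec_get_line_contexts (file : List String) (line_num : Int) (out : List String) : Prop := out = get_line_contexts_alt file line_num
instance (file : List String) (line_num : Int) (out : List String) : Decidable (Spec_get_line_contexts file line_num out) := by unfold Spec_get_line_contexts; infer_instance

-- ===== CLAIM (what is proved, stated in full; the proofs are below) =====
def Claim_equal_get_line_contexts : Prop := ∀ (file : List String) (line_num : Int), Dom_get_line_contexts file line_num → Spec_get_line_contexts file line_num (get_line_contexts file line_num)

-- ===== LEMMAS AND PROOFS =====

-- Skipping phase: while current stays below `before`, A's loop just drops lines.
theorem gclLoopA_skip (before after ln : Int) (d : Nat) :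
    ∀ (xs : List String) (c : Int), c + d < before →
      gclLoopA before after ln xs c = gclLoopA before after ln (xs.drop d) (c + d) := by
  induction d with
  | zero => intro xs c _; simp
  | succ d ih =>
    intro xs c h
    cases xs with
    | nil => simp [gclLoopA]
    | cons x rest =>
      have h1 : c + 1 < before := by omega
      have : gclLoopA before after ln (x :: rest) c = gclLoopA before after ln rest (c + 1) := by
        simp only [gclLoopA]; rw [if_pos h1]
      rw [this, ih rest (c + 1) (by push_cast at h ⊢; omega)]
      simp only [List.drop_succ_cons]
      congr 1
      push_cast
      ring

-- Emitting phase: once skipping is over, A's loop is B's loop on the truncated list.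
theorem gclLoopA_emit (before after ln : Int) :
    ∀ (xs : List String) (c : Int), before ≤ c + 1 →
      gclLoopA before after ln xs c = gclLoopB ln (xs.take (after - c).toNat) (c + 1) := by
  intro xs
  induction xs with
  | nil => intro c _; simp [gclLoopA, gclLoopB]
  | cons x rest ih =>
    intro c h
    simp only [gclLoopA]
    rw [if_neg (by omega)]
    by_cases hb : c + 1 > after
    · rw [if_pos hb]
      have : (after - c).toNat = 0 := by omega
      simp [this, gclLoopB]
    · rw [if_neg hb]
      have htake : (after - c).toNat = (after - (c + 1)).toNat + 1 := by omega
      rw [htake]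
      simp only [List.take_succ_cons]
      rw [ih (c + 1) (by omega)]
      by_cases he : c + 1 = ln
      · rw [if_pos he]; simp [gclLoopB, if_pos he]
      · rw [if_neg he]; simp [gclLoopB, if_neg he]

-- ===== VERDICT (by name: the statement is the Claim_ definition above) =====
theorem get_line_contexts_spec : Claim_equal_get_line_contexts := by
  intro file ln _
  unfold Spec_get_line_contexts get_line_contexts get_line_contexts_alt
  simp only []
  have hstart : (0 : Int) ≤ max 0 (ln - 101) := le_max_left _ _
  have hstop : (0 : Int) ≤ max 0 (ln + 100) := le_max_left _ _
  rw [PySem.List.slice_toNat file hstart hstop]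
  by_cases hsmall : ln - 100 ≤ 1
  · -- no skipping: before ≤ 1, start = 0
    have hb : (if ln - 100 < 0 then (0 : Int) else ln - 100) ≤ 0 + 1 := by split_ifs <;> omega
    rw [gclLoopA_emit _ _ _ file 0 hb]
    have h1 : max 0 (ln - 101) = 0 := by omega
    rw [h1]
    simp only [Int.toNat_zero, List.drop_zero, Nat.sub_zero]
    congr 2
    omega
  · -- skipping phase of length before - 1 = ln - 101
    have hbefore : (if ln - 100 < 0 then (0 : Int) else ln - 100) = ln - 100 := by
      rw [if_neg (by omega)]
    rw [hbefore]
    have hd : (0 : Int) + (ln - 101).toNat < ln - 100 := by omega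
    rw [gclLoopA_skip (ln - 100) (ln + 100) ln (ln - 101).toNat file 0 hd]
    rw [gclLoopA_emit _ _ _ _ _ (by omega)]
    have e1 : (max 0 (ln - 101)).toNat = (ln - 101).toNat := by omega
    have e2 : (max 0 (ln + 100)).toNat - (ln - 101).toNat
        = (ln + 100 - (0 + ((ln - 101).toNat : Int))).toNat := by omega
    have e3 : max 0 (ln - 101) + 1 = 0 + ((ln - 101).toNat : Int) + 1 := by omega
    rw [e1, e2, e3]
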